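-- pv_equiv track=rewrite | github.com/alfianrahmn/labtek_hiring | questions/technical/tech_1/main.py | earliest_discount_robust
-- ===== SOURCE A (Python) =====
-- def earliest_discount_robust(prices, window=3):
--     """
--     Seperti earliest_discount_list(), tapi cek sliding window
--     sehingga drop singkat (noise) diabaikan.
--     (logic window saya refer dari ChatGPT)
--     """
--     n = len(prices)
--     if n < 2:
--         return 0
--
--     first = prices[0]
--     for i in range(1, n):
--         # cek kandidat diskon
--         if not (prices[i] < prices[i - 1] and prices[i] < first):
--             continue
--         # tentukan window
--         left = max(0, i - window // 2)
--         right = min(n, i + window // 2 + 1)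
--         # validasi sustained drop
--         if all(prices[i] <= prices[j] for j in range(left, right)):
--             return i
--     return 0
-- ===== SOURCE B (Python) =====
-- def earliest_discount_robust(prices, window=3):
--     n = len(prices)
--     if n < 2:
--         return 0
--     h = window // 2
--     first = prices[0]
--     # precompute the centered-window minimum for each index; prices[i] itself is always included
--     winmin = [min([prices[j] for j in range(max(0, i - h), min(n, i + h + 1))] + [prices[i]])
--               for i in range(n)]
--     for i in range(1, n):
--         if prices[i] < prices[i - 1] and prices[i] < first and prices[i] <= winmin[i]:
--             return i
--     return 0
-- ===== Notes on version B (the rewrite author's own statement) =====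
-- stated objective: alternative
-- what changed: B precomputes a winmin[] array of centered-window minima (each minimum taken over the explicit index range together with prices[i] itself, so no bounds special-casing is needed) and then does one flat scan returning the first candidate i with prices[i] <= winmin[i], replacing A's per-candidate inner all() pass with an array lookup.
import Mathlib
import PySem

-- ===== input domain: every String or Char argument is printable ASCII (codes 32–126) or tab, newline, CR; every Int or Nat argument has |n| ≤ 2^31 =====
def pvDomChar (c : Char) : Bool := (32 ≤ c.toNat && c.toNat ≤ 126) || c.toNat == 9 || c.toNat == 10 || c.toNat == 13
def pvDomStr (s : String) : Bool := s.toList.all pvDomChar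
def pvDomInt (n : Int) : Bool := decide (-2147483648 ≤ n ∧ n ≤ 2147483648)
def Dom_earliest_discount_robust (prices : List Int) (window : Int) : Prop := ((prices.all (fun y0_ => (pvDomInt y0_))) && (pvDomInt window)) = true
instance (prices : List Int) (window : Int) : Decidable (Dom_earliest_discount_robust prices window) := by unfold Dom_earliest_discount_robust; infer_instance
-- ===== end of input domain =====

-- B replaces A's per-candidate inner all() pass with a precomputed winmin[] array and a flat scan (alternative decomposition, same cost).
-- All list indices both programs use are provably in range, so pyGetD with a dummy default is an exact port of xs[i].

-- ===== PORT A =====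
-- the 'for i in range(1, n)' loop with early return / continue
def pvALoop (prices : List Int) (first n window : Int) : List Int → Int
  | [] => 0
  | i :: rest =>
    if ¬ (PySem.List.pyGetD prices i 0 < PySem.List.pyGetD prices (i - 1) 0 ∧
          PySem.List.pyGetD prices i 0 < first) then
      pvALoop prices first n window rest
    else
      let left := max 0 (i - PySem.Int.floordiv window 2)
      let right := min n (i + PySem.Int.floordiv window 2 + 1)
      if (PySem.List.pyRange left right 1).all
           (fun j => PySem.List.pyGetD prices i 0 ≤ PySem.List.pyGetD prices j 0) then i
      else pvALoop prices first n window rest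

def earliest_discount_robust (prices : List Int) (window : Int) : Int :=
  let n : Int := prices.length
  if n < 2 then 0
  else
    let first := PySem.List.pyGetD prices 0 0
    pvALoop prices first n window (PySem.List.pyRange 1 n 1)

-- ===== PORT B =====
-- Python's min of a nonempty list (B only applies it to nonempty lists)
def pvPyMin : List Int → Int
  | [] => 0
  | x :: xs => xs.foldl min x

-- B's flat scan over range(1, n)
def pvBLoop (prices winmin : List Int) (first : Int) : List Int → Int
  | [] => 0
  | i :: rest =>
    if PySem.List.pyGetD prices i 0 < PySem.List.pyGetD prices (i - 1) 0 ∧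
       PySem.List.pyGetD prices i 0 < first ∧
       PySem.List.pyGetD prices i 0 ≤ PySem.List.pyGetD winmin i 0 then i
    else pvBLoop prices winmin first rest

def earliest_discount_robust_alt (prices : List Int) (window : Int) : Int :=
  let n : Int := prices.length
  if n < 2 then 0
  else
    let h := PySem.Int.floordiv window 2
    let first := PySem.List.pyGetD prices 0 0
    let winmin := (PySem.List.pyRange 0 n 1).map (fun i =>
      pvPyMin ((PySem.List.pyRange (max 0 (i - h)) (min n (i + h + 1)) 1).map
                 (fun j => PySem.List.pyGetD prices j 0) ++ [PySem.List.pyGetD prices i 0]))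
    pvBLoop prices winmin first (PySem.List.pyRange 1 n 1)

-- ===== PRECONDITION & SPEC =====
def Spec_earliest_discount_robust (prices : List Int) (window : Int) (out : Int) : Prop := out = earliest_discount_robust_alt prices window
instance (prices : List Int) (window : Int) (out : Int) : Decidable (Spec_earliest_discount_robust prices window out) := by unfold Spec_earliest_discount_robust; infer_instance

-- ===== CLAIM (what is proved, stated in full; the proofs are below) =====
def Claim_equal_earliest_discount_robust : Prop := ∀ (prices : List Int) (window : Int), Dom_earliest_discount_robust prices window → Spec_earliest_discount_robust prices window (earliest_discount_robust prices window)

-- ===== LEMMAS AND PROOFS =====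

theorem pv_le_foldl_min (xs : List Int) (a p : Int) :
    p ≤ xs.foldl min a ↔ p ≤ a ∧ ∀ x ∈ xs, p ≤ x := by
  induction xs generalizing a with
  | nil => simp
  | cons y ys ih =>
    simp only [List.foldl_cons, ih, List.mem_cons]
    constructor
    · rintro ⟨h1, h2⟩
      refine ⟨le_trans h1 (min_le_left _ _), ?_⟩
      rintro x (rfl | hx)
      · exact le_trans h1 (min_le_right _ _)
      · exact h2 x hx
    · rintro ⟨h1, h2⟩
      exact ⟨le_min h1 (h2 y (Or.inl rfl)), fun x hx => h2 x (Or.inr hx)⟩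

-- A's inner all() over the window ↔ B's comparison against the window minimum
theorem pv_all_iff_le_min (l : List Int) (p : Int) (f : Int → Int) :
    (l.all (fun j => p ≤ f j)) = true ↔ p ≤ pvPyMin (l.map f ++ [p]) := by
  cases l with
  | nil => simp [pvPyMin]
  | cons x xs =>
    simp only [List.all_eq_true, List.map_cons, List.cons_append, pvPyMin,
      pv_le_foldl_min, List.mem_append, List.mem_map, decide_eq_true_eq,
      List.mem_cons]
    constructor
    · intro h
      refine ⟨h x (Or.inl rfl), ?_⟩
      intro y hy
      rcases hy with ⟨j, hj, rfl⟩ | hy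
      · exact h j (Or.inr hj)
      · rcases hy with rfl | hy
        · exact le_refl _
        · simp at hy
    · rintro ⟨h1, h2⟩ j hj
      rcases hj with rfl | hj
      · exact h1
      · exact h2 (f j) (Or.inl ⟨j, hj, rfl⟩)

-- the two loops agree step by step on any list of in-range indices
theorem pv_loop_eq (prices : List Int) (first window : Int)
    (winmin : List Int)
    (hwin : winmin = (PySem.List.pyRange 0 (prices.length : Int) 1).map (fun i =>
      pvPyMin ((PySem.List.pyRange (max 0 (i - PySem.Int.floordiv window 2))
                  (min (prices.length : Int) (i + PySem.Int.floordiv window 2 + 1)) 1).map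
                 (fun j => PySem.List.pyGetD prices j 0) ++ [PySem.List.pyGetD prices i 0])))
    (l : List Int) (hl : ∀ i ∈ l, 0 ≤ i ∧ i < (prices.length : Int)) :
    pvALoop prices first (prices.length : Int) window l = pvBLoop prices winmin first l := by
  induction l with
  | nil => rfl
  | cons i rest ih =>
    have hi := hl i (List.mem_cons_self ..)
    have hrest : ∀ j ∈ rest, 0 ≤ j ∧ j < (prices.length : Int) :=
      fun j hj => hl j (List.mem_cons_of_mem _ hj)
    have hget : PySem.List.pyGetD winmin i 0 =
        pvPyMin ((PySem.List.pyRange (max 0 (i - PySem.Int.floordiv window 2))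
                  (min (prices.length : Int) (i + PySem.Int.floordiv window 2 + 1)) 1).map
                 (fun j => PySem.List.pyGetD prices j 0) ++ [PySem.List.pyGetD prices i 0]) := by
      rw [hwin]
      exact PySem.List.pyGetD_map_pyRange_of_nonneg _ _ _ _ hi.1 hi.2
    simp only [pvALoop, pvBLoop]
    by_cases hc : PySem.List.pyGetD prices i 0 < PySem.List.pyGetD prices (i - 1) 0 ∧
        PySem.List.pyGetD prices i 0 < first
    · rw [if_neg (not_not_intro hc)]
      by_cases hall : ((PySem.List.pyRange (max 0 (i - PySem.Int.floordiv window 2))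
            (min (prices.length : Int) (i + PySem.Int.floordiv window 2 + 1))).all
            (fun j => decide (PySem.List.pyGetD prices i 0 ≤ PySem.List.pyGetD prices j 0))) = true
      · have hle : PySem.List.pyGetD prices i 0 ≤ PySem.List.pyGetD winmin i 0 := by
          rw [hget]
          rw [pv_all_iff_le_min (l := (PySem.List.pyRange (max 0 (i - PySem.Int.floordiv window 2))
            (min (prices.length : Int) (i + PySem.Int.floordiv window 2 + 1)))) ] at hall
          exact hall
        rw [if_pos hall, if_pos ⟨hc.1, hc.2, hle⟩]
      · have hle : ¬ PySem.List.pyGetD prices i 0 ≤ PySem.List.pyGetD winmin i 0 := by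
          rw [hget]
          intro h
          exact hall ((pv_all_iff_le_min _ _ _).mpr h)
        rw [if_neg hall, if_neg (by rintro ⟨_, _, h⟩; exact hle h :
              ¬ (PySem.List.pyGetD prices i 0 < PySem.List.pyGetD prices (i - 1) 0 ∧
                 PySem.List.pyGetD prices i 0 < first ∧
                 PySem.List.pyGetD prices i 0 ≤ PySem.List.pyGetD winmin i 0))]
        exact ih hrest
    · rw [if_pos hc, if_neg (by rintro ⟨h1, h2, _⟩; exact hc ⟨h1, h2⟩ :
              ¬ (PySem.List.pyGetD prices i 0 < PySem.List.pyGetD prices (i - 1) 0 ∧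
                 PySem.List.pyGetD prices i 0 < first ∧
                 PySem.List.pyGetD prices i 0 ≤ PySem.List.pyGetD winmin i 0))]
      exact ih hrest

-- ===== VERDICT (by name: the statement is the Claim_ definition above) =====
theorem earliest_discount_robust_spec : Claim_equal_earliest_discount_robust := by
  intro prices window _
  unfold Spec_earliest_discount_robust earliest_discount_robust earliest_discount_robust_alt
  by_cases hn : (prices.length : Int) < 2
  · simp [hn]
  · simp only [hn, if_false]
    exact pv_loop_eq prices (PySem.List.pyGetD prices 0 0) window _ rfl _
      (fun i hi => by
        have := (PySem.List.mem_pyRange_one).mp hi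
        exact ⟨by omega, this.2⟩)
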